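-- pv_equiv track=rewrite | github.com/arelyx/aoc24 | day7/p2/script.py | get_all_sums
-- ===== SOURCE A (Python) =====
-- def get_all_sums(nums):
--     possible_sums = set()
--     for num in nums:
--         if len(possible_sums) == 0:
--             possible_sums.add(int(num))
--         else:
--             new_possible_sums = set()
--             for curr_sum in list(possible_sums):
--                 new_possible_sums.add(curr_sum * int(num))
--                 new_possible_sums.add(curr_sum + int(num))
--             possible_sums = new_possible_sums
--     return possible_sums
-- ===== SOURCE B (Python) =====
-- def get_all_sums(nums):
--     if not nums:
--         return set()
--
--     def go(sums, rest):
--         if not rest: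
--             return sums
--         num = int(rest[0])
--         return go({v for c in sums for v in (c * num, c + num)}, rest[1:])
--
--     return go({int(nums[0])}, nums[1:])
-- ===== Notes on version B (the rewrite author's own statement) =====
-- stated objective: simpler
-- what changed: Replaces A's imperative loop (per-iteration emptiness test and an inner two-add loop rebuilding each set) by an empty-input guard, a first layer seeded from the first element, and a tail recursion over the remaining operands whose whole step is one set comprehension.
import Mathlib
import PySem

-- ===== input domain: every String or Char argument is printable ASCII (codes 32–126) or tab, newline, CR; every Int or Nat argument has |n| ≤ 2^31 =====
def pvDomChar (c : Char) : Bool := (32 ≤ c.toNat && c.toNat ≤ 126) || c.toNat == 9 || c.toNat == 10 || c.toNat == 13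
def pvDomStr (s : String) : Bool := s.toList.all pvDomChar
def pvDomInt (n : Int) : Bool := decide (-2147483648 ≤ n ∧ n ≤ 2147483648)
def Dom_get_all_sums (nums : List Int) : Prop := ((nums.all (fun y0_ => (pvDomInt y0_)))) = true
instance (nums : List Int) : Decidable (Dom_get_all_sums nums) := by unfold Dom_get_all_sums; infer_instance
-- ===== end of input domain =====

-- B replaces A's imperative loop (per-iteration emptiness test, inner two-add loop rebuilding each
-- set) by an empty-input guard, a first layer seeded from the first element, and a tail recursion whose whole
-- step is one set comprehension (objective: simpler).

-- ===== PORT A =====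
def get_all_sums (nums : List Int) : List Int :=
  nums.foldl
    (fun possible_sums num =>
      if PySem.Set.len possible_sums == 0 then
        PySem.Set.add possible_sums num
      else
        possible_sums.foldl
          (fun new_possible_sums curr_sum =>
            PySem.Set.add (PySem.Set.add new_possible_sums (curr_sum * num)) (curr_sum + num))
          PySem.Set.empty)
    PySem.Set.empty

-- ===== PORT B =====
-- Source B's inner 'go(sums, rest)'; the set comprehension is PySem.Set.ofList of the expanded list
def goLayers (sums : PySem.Set Int) (rest : List Int) : PySem.Set Int :=
  match rest with
  | [] => sums
  | num :: r => goLayers (PySem.Set.ofList (sums.flatMap (fun c => [c * num, c + num]))) r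

def get_all_sums_alt (nums : List Int) : List Int :=
  match nums with
  | [] => PySem.Set.empty
  | n :: rest => goLayers (PySem.Set.ofList [n]) rest

-- ===== PRECONDITION & SPEC =====
def Spec_get_all_sums (nums : List Int) (out : List Int) : Prop := out = get_all_sums_alt nums
instance (nums : List Int) (out : List Int) : Decidable (Spec_get_all_sums nums out) := by unfold Spec_get_all_sums; infer_instance

-- ===== CLAIM (what is proved, stated in full; the proofs are below) =====
def Claim_equal_get_all_sums : Prop := ∀ (nums : List Int), Dom_get_all_sums nums → Spec_get_all_sums nums (get_all_sums nums)

-- ===== LEMMAS AND PROOFS =====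

-- A's loop body, named so the proofs can speak about it (definitionally the lambda in get_all_sums)
def pvStepA : PySem.Set Int → Int → PySem.Set Int :=
  fun possible_sums num =>
    if PySem.Set.len possible_sums == 0 then
      PySem.Set.add possible_sums num
    else
      possible_sums.foldl
        (fun new_possible_sums curr_sum =>
          PySem.Set.add (PySem.Set.add new_possible_sums (curr_sum * num)) (curr_sum + num))
        PySem.Set.empty

theorem get_all_sums_eq_foldl (nums : List Int) :
    get_all_sums nums = nums.foldl pvStepA PySem.Set.empty := rfl

-- A's inner loop is an ordered update with the expanded value list
theorem innerA_eq_update (num : Int) (xs : List Int) (t : PySem.Set Int) :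
    xs.foldl
      (fun new_possible_sums curr_sum =>
        PySem.Set.add (PySem.Set.add new_possible_sums (curr_sum * num)) (curr_sum + num)) t =
    PySem.Set.update t (xs.flatMap (fun c => [c * num, c + num])) := by
  induction xs generalizing t with
  | nil => simp [PySem.Set.update_nil]
  | cons c xs ih =>
    rw [List.foldl_cons, ih, List.flatMap_cons, PySem.Set.update_append,
      PySem.Set.update_cons, PySem.Set.update_cons, PySem.Set.update_nil]

-- on a nonempty layer A's step is exactly B's set comprehension
theorem stepA_of_ne_nil (num : Int) (xs : PySem.Set Int) (hne : xs ≠ []) :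
    pvStepA xs num = PySem.Set.ofList (xs.flatMap (fun c => [c * num, c + num])) := by
  have hlen : (PySem.Set.len xs == 0) = false := by
    cases xs with
    | nil => exact absurd rfl hne
    | cons a l => simp [PySem.Set.len]; omega
  rw [pvStepA, hlen]
  simp only [Bool.false_eq_true, if_false]
  rw [innerA_eq_update num xs PySem.Set.empty, PySem.Set.update_empty]

theorem ofList_ne_nil_of_ne_nil {xs : List Int} (hne : xs ≠ []) :
    PySem.Set.ofList xs ≠ [] := by
  cases xs with
  | nil => exact absurd rfl hne
  | cons a l =>
    intro hcon
    have : a ∈ PySem.Set.ofList (a :: l) := (PySem.Set.mem_ofList _ _).2 (by simp)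
    simp [hcon] at this

-- A's remaining fold over a nonempty layer is B's tail recursion
theorem foldl_stepA_eq_goLayers (rest : List Int) (S : PySem.Set Int) (hne : S ≠ []) :
    rest.foldl pvStepA S = goLayers S rest := by
  induction rest generalizing S with
  | nil => rfl
  | cons num r ih =>
    rw [List.foldl_cons, stepA_of_ne_nil num S hne, goLayers]
    apply ih
    apply ofList_ne_nil_of_ne_nil
    cases S with
    | nil => exact absurd rfl hne
    | cons a l => simp [List.flatMap_cons]

-- ===== VERDICT (by name: the statement is the Claim_ definition above) =====
theorem get_all_sums_spec : Claim_equal_get_all_sums := by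
  intro nums _
  unfold Spec_get_all_sums
  cases nums with
  | nil => rfl
  | cons n rest =>
    rw [get_all_sums_eq_foldl, List.foldl_cons]
    have hfirst : pvStepA PySem.Set.empty n = PySem.Set.ofList [n] := by
      simp [pvStepA, PySem.Set.empty, PySem.Set.len, PySem.Set.add, PySem.Set.contains,
        PySem.Set.ofList]
    rw [hfirst, foldl_stepA_eq_goLayers rest (PySem.Set.ofList [n]) (by simp [PySem.Set.ofList])]
    rfl
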